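-- pv_equiv track=rewrite | github.com/pipilacha/hacker-rank-challenges | array_subset_lowset_maxsum.py | subsetA
-- ===== SOURCE A (Python) =====
-- def subsetA(arr):
--     arr.sort(reverse=True)
--
--     A = None
--
--     for i in range(len(arr)):
--         a = arr[:i+1]
--         b = arr[i+1:]
--         #if sum(a) > sum(b) and len(b) > 0:
--         if sum(a) > sum(b) and len(b) > 0:
--             # if not any(item in b for item in a):  #if i check for intersections some test do not pass??
--             #     if A is not None:
--             #         if sum(a) > sum(a):
--             #             A = a
--             #         elif sum(a) == sum(A) and len(a) < len(A):
--             #             A = a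
--             #     else:
--             #         A = a
--             # if A is not None:
--             #     if sum(a) > sum(a):
--             #         A = a
--             #     elif sum(a) == sum(A) and len(a) < len(A):
--             #         A = a
--             # else:
--             #     A = a
--             A=a
--             break
--
--
--     return sorted(A)
-- ===== SOURCE B (Python) =====
-- def subsetA(arr):
--     # single O(n log n) pass: sort ascending, grow the suffix of largest
--     # elements with a running sum until it outweighs the rest
--     s = sorted(arr)
--     total = sum(s)
--     suffix = 0
--     k = 0
--     for x in reversed(s[1:]):
--         suffix += x
--         k += 1
--         if 2 * suffix > total:
--             return s[len(s) - k:]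
--     return []  # no qualifying subset (original raises here; excluded by Pre_)
-- ===== Notes on version B (the rewrite author's own statement) =====
-- stated objective: alternative
-- what changed: Replaces the scan that re-sums both slices at every index with one sort plus a single reverse pass maintaining a running suffix sum compared against the precomputed total, returning the already-sorted tail directly instead of re-sorting the chosen prefix (O(n log n) worst case vs A's O(n^2) worst case, though A's early break makes a timing run inconclusive).
import Mathlib
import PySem

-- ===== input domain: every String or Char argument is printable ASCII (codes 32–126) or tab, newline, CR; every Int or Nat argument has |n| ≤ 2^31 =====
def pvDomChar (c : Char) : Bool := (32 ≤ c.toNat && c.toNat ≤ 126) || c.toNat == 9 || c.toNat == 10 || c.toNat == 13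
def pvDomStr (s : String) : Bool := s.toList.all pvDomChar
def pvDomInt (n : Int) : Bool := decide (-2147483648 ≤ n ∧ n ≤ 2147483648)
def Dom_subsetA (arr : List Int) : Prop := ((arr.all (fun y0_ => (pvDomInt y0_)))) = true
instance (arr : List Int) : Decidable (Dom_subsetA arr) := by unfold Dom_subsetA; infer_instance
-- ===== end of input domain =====

-- B replaces A's quadratic re-summing scan by one sort plus a single running-suffix-sum pass;
-- A sorts `arr` in place (the equivalence proved is about the return value only).

-- ===== PORT A =====
-- the for-loop with break: first i (from position `i` on) whose prefix/suffix split qualifies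
def subsetAGo (s : List Int) (i : Nat) : Option (List Int) :=
  if _h : i < s.length then
    let a := s.take (i + 1)
    let b := s.drop (i + 1)
    if a.sum > b.sum ∧ 0 < b.length then some a
    else subsetAGo s (i + 1)
  else none
termination_by s.length - i

def subsetA (arr : List Int) : List Int :=
  let s := PySem.List.sorted arr (fun x => x) true   -- arr.sort(reverse=True)
  match subsetAGo s 0 with
  | some a => PySem.List.sorted a (fun x => x) false -- sorted(A)
  | none => []                                       -- Python: sorted(None) raises TypeError; excluded by Pre_

-- ===== PORT B =====
-- the for-loop over reversed(s[1:]) with running suffix sum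
def subsetAltGo (s : List Int) (total : Int) (suffix : Int) (k : Nat) : List Int → List Int
  | [] => []
  | x :: rest =>
    let suffix' := suffix + x
    let k' := k + 1
    if 2 * suffix' > total then s.drop (s.length - k')
    else subsetAltGo s total suffix' k' rest

def subsetA_alt (arr : List Int) : List Int :=
  let s := PySem.List.sorted arr (fun x => x) false
  subsetAltGo s s.sum 0 0 (s.drop 1).reverse

-- ===== PRECONDITION & SPEC =====
-- Pre_ excludes exactly the inputs on which A finds no qualifying split (A then calls sorted(None), a TypeError).
def Pre_subsetA (arr : List Int) : Prop :=
  ∃ k < arr.length, 1 ≤ k ∧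
    2 * ((PySem.List.sorted arr (fun x => x) true).take k).sum > arr.sum
instance (arr : List Int) : Decidable (Pre_subsetA arr) := by unfold Pre_subsetA; infer_instance
def pvWitness_subsetA : List Int := ([3, 7, 5, 6, 2])

def Spec_subsetA (arr : List Int) (out : List Int) : Prop := out = subsetA_alt arr
instance (arr : List Int) (out : List Int) : Decidable (Spec_subsetA arr out) := by unfold Spec_subsetA; infer_instance

-- ===== CLAIM (what is proved, stated in full; the proofs are below) =====
def Claim_equal_subsetA : Prop := ∀ (arr : List Int), Dom_subsetA arr → Pre_subsetA arr → Spec_subsetA arr (subsetA arr)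

-- ===== LEMMAS AND PROOFS =====

-- the descending sort is the reverse of the ascending one (Int values: key is injective)
theorem desc_eq_reverse_asc (arr : List Int) :
    PySem.List.sorted arr (fun x => x) true = (PySem.List.sorted arr (fun x => x) false).reverse := by
  have h := PySem.List.eq_of_perm_of_pairwise_le_of_injective
    (l₁ := (PySem.List.sorted arr (fun x => x) true).reverse)
    (l₂ := PySem.List.sorted arr (fun x => x) false)
    (fun x => x) (fun a b hab => hab)
    ((((PySem.List.sorted arr (fun x => x) true).reverse_perm).trans
        (PySem.List.sorted_perm arr (fun x => x) true)).trans
      (PySem.List.sorted_perm arr (fun x => x) false).symm)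
    (List.pairwise_reverse.mpr (PySem.List.sorted_pairwise_rev arr (fun x => x)))
    (PySem.List.sorted_pairwise arr (fun x => x))
  calc PySem.List.sorted arr (fun x => x) true
      = (PySem.List.sorted arr (fun x => x) true).reverse.reverse := by rw [List.reverse_reverse]
    _ = (PySem.List.sorted arr (fun x => x) false).reverse := by rw [h]

-- once the remaining suffix is empty, A's loop finds nothing
theorem subsetAGo_none (s : List Int) (i : Nat) (h : s.length ≤ i + 1) : subsetAGo s i = none := by
  unfold subsetAGo
  split
  · next hlt =>
    have hb : s.drop (i + 1) = [] := List.drop_eq_nil_of_le h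
    rw [hb, if_neg (by simp)]
    exact subsetAGo_none s (i + 1) (by omega)
  · rfl
termination_by s.length - i

-- the two loops, step for step, from position i on
theorem loop_eq (asc : List Int) (hasc : asc.Pairwise (fun a b => a ≤ b)) : ∀ m i, asc.length - 1 - i = m →
    (match subsetAGo asc.reverse i with
     | some a => PySem.List.sorted a (fun x => x) false
     | none => ([] : List Int)) =
    subsetAltGo asc asc.sum ((asc.reverse.take i).sum) i
      ((asc.reverse.take (asc.length - 1)).drop i) := by
  intro m
  induction m with
  | zero =>
    intro i hi
    have hrest : (asc.reverse.take (asc.length - 1)).drop i = [] := by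
      apply List.drop_eq_nil_of_le
      simp [List.length_take]
      omega
    rw [hrest, subsetAGo_none asc.reverse i (by simp; omega)]
    rfl
  | succ m ih =>
    intro i hi
    have hn : i + 1 < asc.length := by omega
    have hi' : i < asc.reverse.length := by simp; omega
    have hitk : i < (asc.reverse.take (asc.length - 1)).length := by
      simp [List.length_take]; omega
    -- expose one step of B's list
    rw [List.drop_eq_getElem_cons hitk]
    have hgetk : (asc.reverse.take (asc.length - 1))[i] = asc.reverse[i] := List.getElem_take
    -- one step of A's loop
    unfold subsetAGo
    rw [dif_pos hi']
    have hsum : (asc.reverse.take i).sum + asc.reverse[i] = (asc.reverse.take (i + 1)).sum :=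
      (List.sum_take_succ asc.reverse i hi').symm
    have htot : (asc.reverse.take (i + 1)).sum + (asc.reverse.drop (i + 1)).sum = asc.sum := by
      have h2 := congrArg List.sum (List.take_append_drop (i + 1) asc.reverse)
      simp only [List.sum_append, List.sum_reverse] at h2
      exact h2
    have hblen : 0 < (asc.reverse.drop (i + 1)).length := by simp; omega
    by_cases hc : 2 * (asc.reverse.take (i + 1)).sum > asc.sum
    · rw [if_pos ⟨by omega, hblen⟩]
      show PySem.List.sorted (asc.reverse.take (i + 1)) (fun x => x) false = _
      unfold subsetAltGo
      rw [if_pos (by rw [hgetk, hsum]; exact hc)]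
      -- sorted(top k elements) is the ascending tail itself
      have htk : asc.reverse.take (i + 1) = (asc.drop (asc.length - (i + 1))).reverse :=
        List.take_reverse
      have hperm : (asc.drop (asc.length - (i + 1))).Perm (asc.reverse.take (i + 1)) := by
        rw [htk]; exact (List.reverse_perm _).symm
      exact PySem.List.sorted_id_eq_of_perm_of_pairwise _ _ hperm hasc.drop
    · rw [if_neg (by
        rintro ⟨h1, _⟩
        omega)]
      unfold subsetAltGo
      rw [if_neg (by rw [hgetk, hsum]; exact hc)]
      rw [hgetk, hsum]
      exact ih (i + 1) (by omega)

-- ===== VERDICT (by name: the statement is the Claim_ definition above) =====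
theorem subsetA_spec : Claim_equal_subsetA := by
  intro arr _ _
  show subsetA arr = subsetA_alt arr
  unfold subsetA subsetA_alt
  rw [desc_eq_reverse_asc arr]
  have h := loop_eq (PySem.List.sorted arr (fun x => x) false)
    (PySem.List.sorted_pairwise arr (fun x => x))
    ((PySem.List.sorted arr (fun x => x) false).length - 1) 0 rfl
  simp only [List.take_zero, List.sum_nil] at h
  rw [← List.reverse_drop (l := PySem.List.sorted arr (fun x => x) false) (i := 1)] at h
  exact h
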